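-- pv_equiv track=rewrite | github.com/Nikhil1601/payment_llm_recon_engine | recon/recon_engine.py | reconciliation_summary
-- ===== SOURCE A (Python) =====
-- def reconciliation_summary(results):
--
--     summary = {
--         "total_transactions": len(results),
--         "exact_match": 0,
--         "partial_match": 0,
--         "mismatch": 0
--     }
--
--     for r in results:
--         if r["status"] == "EXACT_MATCH":
--             summary["exact_match"] += 1
--         elif r["status"] == "PARTIAL_MATCH":
--             summary["partial_match"] += 1
--         else:
--             summary["mismatch"] += 1
--
--     return summary
-- ===== SOURCE B (Python) =====
-- def reconciliation_summary(results):
--     # divide and conquer: split the list in half, classify single records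
--     # at the leaves, and merge the (exact, partial, mismatch) triples.
--     def go(rs):
--         if len(rs) == 0:
--             return (0, 0, 0)
--         if len(rs) == 1:
--             s = rs[0]["status"]
--             if s == "EXACT_MATCH":
--                 return (1, 0, 0)
--             if s == "PARTIAL_MATCH":
--                 return (0, 1, 0)
--             return (0, 0, 1)
--         mid = len(rs) // 2
--         e1, p1, m1 = go(rs[:mid])
--         e2, p2, m2 = go(rs[mid:])
--         return (e1 + e2, p1 + p2, m1 + m2)
--
--     e, p, m = go(results)
--     return {
--         "total_transactions": len(results),
--         "exact_match": e,
--         "partial_match": p,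
--         "mismatch": m,
--     }
-- ===== Notes on version B (the rewrite author's own statement) =====
-- stated objective: alternative
-- what changed: B replaces A's single accumulating if/elif/else loop by a recursive divide-and-conquer: it halves the list, classifies one-element slices at the leaves, and merges (exact, partial, mismatch) count triples bottom-up.
import Mathlib
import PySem

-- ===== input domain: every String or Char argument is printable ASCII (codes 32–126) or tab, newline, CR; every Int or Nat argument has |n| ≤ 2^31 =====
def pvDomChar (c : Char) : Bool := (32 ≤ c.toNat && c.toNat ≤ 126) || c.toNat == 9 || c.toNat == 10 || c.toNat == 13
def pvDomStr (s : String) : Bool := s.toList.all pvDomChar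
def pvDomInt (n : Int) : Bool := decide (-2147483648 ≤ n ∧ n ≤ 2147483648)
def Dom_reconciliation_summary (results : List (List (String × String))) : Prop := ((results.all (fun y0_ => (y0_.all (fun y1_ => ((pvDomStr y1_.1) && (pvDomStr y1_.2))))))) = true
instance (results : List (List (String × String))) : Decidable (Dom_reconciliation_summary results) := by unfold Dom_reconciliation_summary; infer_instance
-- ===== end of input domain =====

-- B replaces A's accumulating if/elif/else loop by a recursive divide-and-conquer that halves
-- the list, classifies one-element slices at the leaves and merges count triples (alternative).

-- ===== PORT A =====
def reconciliation_summary (results : List (List (String × String))) : List (String × Int) :=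
  let summary : PySem.Dict String Int :=
    ((((PySem.Dict.empty.insert "total_transactions" (results.length : Int)).insert
        "exact_match" 0).insert "partial_match" 0).insert "mismatch" 0)
  let summary := results.foldl (fun s r =>
      if (PySem.Dict.mk r).get? "status" = some "EXACT_MATCH" then
        s.modify "exact_match" 0 (· + 1)
      else if (PySem.Dict.mk r).get? "status" = some "PARTIAL_MATCH" then
        s.modify "partial_match" 0 (· + 1)
      else
        s.modify "mismatch" 0 (· + 1)) summary
  summary.items

-- ===== PORT B =====
-- the status a record carries (under Pre_ the key is present, so the default is never used)
def pvStatus (r : List (String × String)) : String := (PySem.Dict.mk r).getD "status" ""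

-- Source B's helper go: rs[:mid] / rs[mid:] are List.take/drop (exact since 0 ≤ mid ≤ len rs)
def pvGo (rs : List (List (String × String))) : Int × Int × Int :=
  if rs.length = 0 then (0, 0, 0)
  else if rs.length = 1 then
    let s := pvStatus (rs.headD [])
    if s = "EXACT_MATCH" then (1, 0, 0)
    else if s = "PARTIAL_MATCH" then (0, 1, 0)
    else (0, 0, 1)
  else
    let mid := rs.length / 2
    let a := pvGo (rs.take mid)
    let b := pvGo (rs.drop mid)
    (a.1 + b.1, a.2.1 + b.2.1, a.2.2 + b.2.2)
termination_by rs.length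
decreasing_by
  · simp [List.length_take]; omega
  · simp [List.length_drop]; omega

def reconciliation_summary_alt (results : List (List (String × String))) : List (String × Int) :=
  let t := pvGo results
  [("total_transactions", (results.length : Int)), ("exact_match", t.1),
   ("partial_match", t.2.1), ("mismatch", t.2.2)]

-- ===== PRECONDITION & SPEC =====
-- Pre_ excludes records without a "status" key, on which both Pythons raise KeyError.
def Pre_reconciliation_summary (results : List (List (String × String))) : Prop :=
  ∀ r ∈ results, "status" ∈ r.map Prod.fst
instance (results : List (List (String × String))) : Decidable (Pre_reconciliation_summary results) := by unfold Pre_reconciliation_summary; infer_instance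
def pvWitness_reconciliation_summary : (List (List (String × String))) :=
  [[("status", "EXACT_MATCH")], [("status", "NO_MATCH"), ("id", "7")]]

def Spec_reconciliation_summary (results : List (List (String × String))) (out : List (String × Int)) : Prop := out = reconciliation_summary_alt results
instance (results : List (List (String × String))) (out : List (String × Int)) : Decidable (Spec_reconciliation_summary results out) := by unfold Spec_reconciliation_summary; infer_instance

-- ===== CLAIM (what is proved, stated in full; the proofs are below) =====
def Claim_equal_reconciliation_summary : Prop := ∀ (results : List (List (String × String))), Dom_reconciliation_summary results → Pre_reconciliation_summary results → Spec_reconciliation_summary results (reconciliation_summary results)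

-- ===== LEMMAS AND PROOFS =====

lemma pvStatus_get? (r : List (String × String)) (h : "status" ∈ r.map Prod.fst) :
    (PySem.Dict.mk r).get? "status" = some (pvStatus r) := by
  have hc : (PySem.Dict.mk r).contains "status" = true := by
    simpa [PySem.Dict.contains_iff_mem_keys, PySem.Dict.keys] using h
  rw [PySem.Dict.contains_eq_isSome_get?] at hc
  cases hg : (PySem.Dict.mk r).get? "status" with
  | none => simp [hg] at hc
  | some v => simp [pvStatus, PySem.Dict.getD_eq_get?_getD, hg]

-- A's loop on the literal 4-key summary, characterised by status counts
lemma pvLoopA (l : List (List (String × String)))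
    (h : ∀ r ∈ l, "status" ∈ r.map Prod.fst) (n a b c : Int) :
    (l.foldl (fun s r =>
      if (PySem.Dict.mk r).get? "status" = some "EXACT_MATCH" then
        s.modify "exact_match" 0 (· + 1)
      else if (PySem.Dict.mk r).get? "status" = some "PARTIAL_MATCH" then
        s.modify "partial_match" 0 (· + 1)
      else
        s.modify "mismatch" 0 (· + 1))
      (PySem.Dict.mk [("total_transactions", n), ("exact_match", a),
                      ("partial_match", b), ("mismatch", c)])).items
    = [("total_transactions", n),
       ("exact_match", a + ((l.map pvStatus).count "EXACT_MATCH" : Int)),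
       ("partial_match", b + ((l.map pvStatus).count "PARTIAL_MATCH" : Int)),
       ("mismatch", c + ((l.length : Int)
          - ((l.map pvStatus).count "EXACT_MATCH" : Int)
          - ((l.map pvStatus).count "PARTIAL_MATCH" : Int)))] := by
  induction l generalizing a b c with
  | nil => simp
  | cons r t ih =>
    have hr := pvStatus_get? r (h r (by simp))
    have ht : ∀ r ∈ t, "status" ∈ r.map Prod.fst := fun r hm => h r (by simp [hm])
    simp only [List.foldl_cons, hr]
    by_cases he : pvStatus r = "EXACT_MATCH"
    · have : (PySem.Dict.mk [("total_transactions", n), ("exact_match", a),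
          ("partial_match", b), ("mismatch", c)]).modify "exact_match" 0 (· + 1)
          = PySem.Dict.mk [("total_transactions", n), ("exact_match", a + 1),
          ("partial_match", b), ("mismatch", c)] := by
        apply PySem.Dict.ext
        simp [PySem.Dict.modify, PySem.Dict.getD_eq_get?_getD, PySem.Dict.get?_mk_cons,
          PySem.Dict.items_insert, PySem.Dict.contains_mk]
      rw [if_pos (by simp [he]), this, ih ht]
      simp [he]
      omega
    · by_cases hp : pvStatus r = "PARTIAL_MATCH"
      · have : (PySem.Dict.mk [("total_transactions", n), ("exact_match", a),
            ("partial_match", b), ("mismatch", c)]).modify "partial_match" 0 (· + 1)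
            = PySem.Dict.mk [("total_transactions", n), ("exact_match", a),
            ("partial_match", b + 1), ("mismatch", c)] := by
          apply PySem.Dict.ext
          simp [PySem.Dict.modify, PySem.Dict.getD_eq_get?_getD, PySem.Dict.get?_mk_cons,
            PySem.Dict.items_insert, PySem.Dict.contains_mk]
        rw [if_neg (by simp [he]), if_pos (by simp [hp]), this, ih ht]
        simp [hp]
        omega
      · have : (PySem.Dict.mk [("total_transactions", n), ("exact_match", a),
            ("partial_match", b), ("mismatch", c)]).modify "mismatch" 0 (· + 1)
            = PySem.Dict.mk [("total_transactions", n), ("exact_match", a),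
            ("partial_match", b), ("mismatch", c + 1)] := by
          apply PySem.Dict.ext
          simp [PySem.Dict.modify, PySem.Dict.getD_eq_get?_getD, PySem.Dict.get?_mk_cons,
            PySem.Dict.items_insert, PySem.Dict.contains_mk]
        rw [if_neg (by simp [he]), if_neg (by simp [hp]), this, ih ht]
        simp [hp, he]
        omega

-- B's divide-and-conquer computes exactly the three status counts
lemma pvGo_eq_aux (n : Nat) : ∀ rs : List (List (String × String)), rs.length = n →
    pvGo rs = (((rs.map pvStatus).count "EXACT_MATCH" : Int),
               ((rs.map pvStatus).count "PARTIAL_MATCH" : Int),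
               ((rs.length : Int)
                 - ((rs.map pvStatus).count "EXACT_MATCH" : Int)
                 - ((rs.map pvStatus).count "PARTIAL_MATCH" : Int))) := by
  induction n using Nat.strong_induction_on with
  | _ n ih =>
  intro rs hn
  rw [pvGo]
  by_cases h0 : rs.length = 0
  · have : rs = [] := List.length_eq_zero_iff.mp h0
    subst this; simp
  · by_cases h1 : rs.length = 1
    · obtain ⟨r, hr⟩ := List.length_eq_one_iff.mp h1
      subst hr
      simp only [if_neg h0, if_pos h1, List.headD_cons]
      by_cases he : pvStatus r = "EXACT_MATCH"
      · simp [he]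
      · by_cases hp : pvStatus r = "PARTIAL_MATCH" <;> simp [he, hp]
    · simp only [if_neg h0, if_neg h1]
      have htk := ih (rs.take (rs.length / 2)).length
        (by rw [← hn]; simp [List.length_take]; omega) _ rfl
      have hdr := ih (rs.drop (rs.length / 2)).length
        (by rw [← hn]; simp [List.length_drop]; omega) _ rfl
      have hsplit : rs.take (rs.length / 2) ++ rs.drop (rs.length / 2) = rs :=
        List.take_append_drop _ _
      have hcE : (rs.map pvStatus).count "EXACT_MATCH"
          = ((rs.take (rs.length / 2)).map pvStatus).count "EXACT_MATCH"
            + ((rs.drop (rs.length / 2)).map pvStatus).count "EXACT_MATCH" := by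
        conv_lhs => rw [← hsplit]
        rw [List.map_append, List.count_append]
      have hcP : (rs.map pvStatus).count "PARTIAL_MATCH"
          = ((rs.take (rs.length / 2)).map pvStatus).count "PARTIAL_MATCH"
            + ((rs.drop (rs.length / 2)).map pvStatus).count "PARTIAL_MATCH" := by
        conv_lhs => rw [← hsplit]
        rw [List.map_append, List.count_append]
      have hlsum : (rs.take (rs.length / 2)).length + (rs.drop (rs.length / 2)).length
          = rs.length := by
        simp [List.length_take, List.length_drop]; omega
      rw [htk, hdr]
      simp only [Prod.mk.injEq]
      refine ⟨by rw [hcE]; push_cast; ring, by rw [hcP]; push_cast; ring, ?_⟩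
      rw [hcE, hcP]
      push_cast
      omega

lemma pvGo_eq (rs : List (List (String × String))) :
    pvGo rs = (((rs.map pvStatus).count "EXACT_MATCH" : Int),
               ((rs.map pvStatus).count "PARTIAL_MATCH" : Int),
               ((rs.length : Int)
                 - ((rs.map pvStatus).count "EXACT_MATCH" : Int)
                 - ((rs.map pvStatus).count "PARTIAL_MATCH" : Int))) :=
  pvGo_eq_aux rs.length rs rfl

-- ===== VERDICT (by name: the statement is the Claim_ definition above) =====
theorem reconciliation_summary_spec : Claim_equal_reconciliation_summary := by
  intro results _ hpre
  show _ = _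
  unfold reconciliation_summary reconciliation_summary_alt
  have hinit : ((((PySem.Dict.empty.insert "total_transactions" ((results.length : Int))).insert
      "exact_match" 0).insert "partial_match" 0).insert "mismatch" (0 : Int))
      = PySem.Dict.mk [("total_transactions", (results.length : Int)), ("exact_match", 0),
                       ("partial_match", 0), ("mismatch", 0)] := by
    apply PySem.Dict.ext
    simp [PySem.Dict.items_insert, PySem.Dict.contains_insert, PySem.Dict.empty]
  simp only [hinit, pvLoopA results hpre, pvGo_eq]
  simp
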